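-- pv_equiv track=rewrite | github.com/kanqzy/Hello_World_Public_Test | src/jsonDataFormatString.py | getFormatTreePath
-- ===== SOURCE A (Python) =====
-- def getFormatTreePath(treePath):
--     """
--     获取格式化的树路径
--         由于树路径是字母和数字组合, 每一个子路径名短小, 人肉眼读取并记住该树路径, 非常不方便
--         此处将其进行格式以便肉眼很好的阅读记忆每一个子路径名 每3个元素空2个空格
--         例如: 原路径 `/c1/c0/c1/c0/c3/c0/c0/c2` 格式化后变为 `/c1/c0/c1  /c0/c3/c0  /c0/c2`
--     """
--     treePath_format = treePath
--     treePathElements = treePath[1:].split("/")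
--     treePathElements_len = len(treePathElements)
--     if treePathElements_len > 3:
--         treePath_format = ""
--         for i in range(treePathElements_len):
--             treePathElement = treePathElements[i]
--             space = "  " if i != 0 and (i + 1) % 3 == 1 else ""
--             treePath_format += space + "/" + treePathElement
--
--     return treePath_format
-- ===== SOURCE B (Python) =====
-- def getFormatTreePath(treePath):
--     elements = treePath[1:].split("/")
--     if len(elements) <= 3:
--         return treePath
--     chunks = [elements[i:i + 3] for i in range(0, len(elements), 3)]
--     return "  ".join("/" + "/".join(chunk) for chunk in chunks)
-- ===== Notes on version B (the rewrite author's own statement) =====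
-- stated objective: simpler
-- what changed: Replaces the index-driven accumulator loop with modulo-based separator insertion by slicing the elements into chunks of three and joining the formatted chunks with two spaces.
import Mathlib
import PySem

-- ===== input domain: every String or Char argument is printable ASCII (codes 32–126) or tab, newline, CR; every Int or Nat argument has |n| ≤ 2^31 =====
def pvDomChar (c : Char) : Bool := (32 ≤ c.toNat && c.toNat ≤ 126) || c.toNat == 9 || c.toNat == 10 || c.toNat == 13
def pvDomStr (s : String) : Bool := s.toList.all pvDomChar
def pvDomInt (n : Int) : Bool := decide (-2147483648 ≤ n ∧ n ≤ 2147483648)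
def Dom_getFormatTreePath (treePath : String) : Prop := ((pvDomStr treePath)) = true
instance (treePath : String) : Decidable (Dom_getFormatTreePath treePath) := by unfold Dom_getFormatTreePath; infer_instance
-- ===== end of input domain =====

-- B formats the path by chunking the elements into groups of three and joining, instead of A's
-- index-driven accumulator loop with a modulo separator test; simpler decomposition, same values.


-- ===== PORT A =====
-- A's for-loop over range(len): structural recursion over the element list carrying the
-- running index i and the accumulated characters (string concat done on List Char; exact).
def pvABuild : List (List Char) → Nat → List Char → List Char
  | [], _, acc => acc
  | e :: rest, i, acc =>
      pvABuild rest (i + 1)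
        (acc ++ (if i ≠ 0 ∧ (i + 1) % 3 = 1 then "  ".toList else []) ++ '/' :: e)

def getFormatTreePath (treePath : String) : String :=
  let treePathElements :=
    PySem.Chars.splitOn (PySem.Str.slice treePath (some 1) none).toList "/".toList
  if treePathElements.length > 3 then String.ofList (pvABuild treePathElements 0 [])
  else treePath

-- ===== PORT B =====
-- B's [elements[i:i+3] for i in range(0, n, 3)]: consecutive chunks of three.
def pvChunks3 : List (List Char) → List (List (List Char))
  | [] => []
  | e :: rest => (e :: rest.take 2) :: pvChunks3 (rest.drop 2)
  termination_by es => es.length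
  decreasing_by simp [List.length_drop]

-- "/" + "/".join(chunk)
def pvFmtChunk (c : List (List Char)) : List Char := '/' :: PySem.Chars.join ['/'] c

def getFormatTreePath_alt (treePath : String) : String :=
  let elements :=
    PySem.Chars.splitOn (PySem.Str.slice treePath (some 1) none).toList "/".toList
  if elements.length ≤ 3 then treePath
  else String.ofList (PySem.Chars.join "  ".toList ((pvChunks3 elements).map pvFmtChunk))

-- ===== PRECONDITION & SPEC =====
def Spec_getFormatTreePath (treePath : String) (out : String) : Prop := out = getFormatTreePath_alt treePath
instance (treePath : String) (out : String) : Decidable (Spec_getFormatTreePath treePath out) := by unfold Spec_getFormatTreePath; infer_instance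

-- ===== CLAIM (what is proved, stated in full; the proofs are below) =====
def Claim_equal_getFormatTreePath : Prop := ∀ (treePath : String), Dom_getFormatTreePath treePath → Spec_getFormatTreePath treePath (getFormatTreePath treePath)

-- ===== LEMMAS AND PROOFS =====

theorem pvChunks3_nil : pvChunks3 [] = [] := by simp [pvChunks3]

theorem pvChunks3_cons (e : List Char) (rest : List (List Char)) :
    pvChunks3 (e :: rest) = (e :: rest.take 2) :: pvChunks3 (rest.drop 2) := by
  rw [pvChunks3]

-- the tail of a two-space join: every chunk after the first is preceded by "  "
def pvGRest (cs : List (List (List Char))) : List Char :=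
  (cs.map (fun c => "  ".toList ++ pvFmtChunk c)).flatten

theorem pvJoin_map_fmt (c : List (List Char)) (cs : List (List (List Char))) :
    PySem.Chars.join "  ".toList ((c :: cs).map pvFmtChunk)
      = pvFmtChunk c ++ pvGRest cs := by
  induction cs generalizing c with
  | nil => simp [pvGRest, PySem.Chars.join_singleton]
  | cons d ds ih =>
      simp only [List.map_cons] at *
      rw [PySem.Chars.join_cons_cons, ih d]
      simp [pvGRest]

-- A's loop from a nonzero index divisible by 3 produces "  " before each chunk of three
theorem pvABuild_from : ∀ (es : List (List Char)) (i : Nat), i % 3 = 0 → i ≠ 0 →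
    ∀ acc, pvABuild es i acc = acc ++ pvGRest (pvChunks3 es)
  | [], i, _, _, acc => by simp [pvABuild, pvChunks3, pvGRest]
  | [a], i, h3, h0, acc => by
      simp only [pvABuild, pvChunks3_cons, pvChunks3_nil, pvGRest, List.take_nil, List.drop_nil]
      rw [if_pos ⟨h0, by omega⟩]
      simp [pvFmtChunk, PySem.Chars.join_singleton]
  | [a, b], i, h3, h0, acc => by
      simp only [pvABuild, pvChunks3_cons, pvChunks3_nil, pvGRest, List.take, List.drop]
      rw [if_pos ⟨h0, by omega⟩, if_neg (by omega)]
      simp [pvFmtChunk, PySem.Chars.join_cons_cons, PySem.Chars.join_singleton]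
  | a :: b :: c :: rest, i, h3, h0, acc => by
      have h1 : pvABuild (a :: b :: c :: rest) i acc
          = pvABuild rest (i + 3) (acc ++ "  ".toList ++ '/' :: a ++ '/' :: b ++ '/' :: c) := by
        simp only [pvABuild]
        rw [if_pos ⟨h0, by omega⟩, if_neg (by omega), if_neg (by omega)]
        simp [Nat.add_assoc]
      rw [h1, pvABuild_from rest (i + 3) (by omega) (by omega)]
      simp only [pvChunks3_cons, List.take, List.drop, pvGRest, List.map_cons, List.flatten_cons]
      simp [pvFmtChunk, PySem.Chars.join_cons_cons, PySem.Chars.join_singleton]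
  termination_by es => es.length
  decreasing_by simp; omega

-- at index 0 the two programs agree chunk for chunk
theorem pvBody : ∀ (es : List (List Char)),
    pvABuild es 0 [] = PySem.Chars.join "  ".toList ((pvChunks3 es).map pvFmtChunk)
  | [] => by simp [pvABuild, pvChunks3_nil, PySem.Chars.join_nil]
  | [a] => by
      simp [pvABuild, pvChunks3_cons, pvChunks3_nil, pvFmtChunk, PySem.Chars.join_singleton]
  | [a, b] => by
      simp [pvABuild, pvChunks3_cons, pvChunks3_nil, pvFmtChunk, PySem.Chars.join_cons_cons,
        PySem.Chars.join_singleton]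
  | a :: b :: c :: rest => by
      have h1 : pvABuild (a :: b :: c :: rest) 0 []
          = pvABuild rest 3 ('/' :: a ++ '/' :: b ++ '/' :: c) := by
        simp [pvABuild]
      rw [h1]
      cases rest with
      | nil =>
          simp [pvABuild, pvChunks3_cons, pvChunks3_nil, pvFmtChunk,
            PySem.Chars.join_cons_cons, PySem.Chars.join_singleton]
      | cons d rest' =>
          rw [pvABuild_from (d :: rest') 3 (by omega) (by omega)]
          simp only [pvChunks3_cons, List.take, List.drop, pvJoin_map_fmt]
          simp [pvFmtChunk, PySem.Chars.join_cons_cons, PySem.Chars.join_singleton]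

-- ===== VERDICT (by name: the statement is the Claim_ definition above) =====
theorem getFormatTreePath_spec : Claim_equal_getFormatTreePath := by
  intro treePath _
  unfold Spec_getFormatTreePath
  simp only [getFormatTreePath, getFormatTreePath_alt]
  by_cases h :
    (PySem.Chars.splitOn (PySem.Str.slice treePath (some 1) none).toList "/".toList).length > 3
  · rw [if_pos h, if_neg (by omega)]
    exact congrArg _ (pvBody _)
  · rw [if_neg h, if_pos (by omega)]
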